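-- pv_equiv track=rewrite | github.com/Yosif43/SoftUni-Courses | Python Advance/07.Workshop/game.py | is_col_win_possible
-- ===== SOURCE A (Python) =====
-- def is_col_win_possible(board_):
--     columns = []
--     for col_ in range(len(board_)):
--         current_column = []
--         for row_ in range(len(board_)):
--             current_column.append(board_[row_][col_])
--         columns.append(current_column)
--     if all(['X' in col_ and 'O' in col_ for col_ in columns]):
--         return False
--     return True
-- ===== SOURCE B (Python) =====
-- def is_col_win_possible(board_):
--     # One row-major pass maintaining per-column "seen X"/"seen O" bit masks;
--     # no transposed columns are built.
--     n = len(board_)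
--     has_x = [False] * n
--     has_o = [False] * n
--     for row in board_:
--         has_x = [row[c] == 'X' or h for c, h in enumerate(has_x)]
--         has_o = [row[c] == 'O' or h for c, h in enumerate(has_o)]
--     return not (all(has_x) and all(has_o))
-- ===== Notes on version B (the rewrite author's own statement) =====
-- stated objective: alternative
-- what changed: Instead of materialising every transposed column and then scanning each column for 'X' and 'O', B makes a single row-major pass that folds each row into two per-column boolean masks (seen-X / seen-O) and checks the masks at the end.
import Mathlib
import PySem

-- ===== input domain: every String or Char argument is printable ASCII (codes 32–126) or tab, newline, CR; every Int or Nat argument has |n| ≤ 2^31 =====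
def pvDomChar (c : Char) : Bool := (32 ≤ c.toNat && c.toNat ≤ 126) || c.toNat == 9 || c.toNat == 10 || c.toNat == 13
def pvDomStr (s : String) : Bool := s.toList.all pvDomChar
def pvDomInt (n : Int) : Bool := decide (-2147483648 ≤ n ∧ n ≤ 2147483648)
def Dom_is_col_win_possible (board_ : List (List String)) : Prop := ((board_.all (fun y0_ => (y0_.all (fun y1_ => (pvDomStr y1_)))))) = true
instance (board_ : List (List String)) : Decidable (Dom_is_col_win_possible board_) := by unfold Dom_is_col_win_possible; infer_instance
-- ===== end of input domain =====

-- B replaces A's explicit column transposition by a single row-pass over two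
-- per-column boolean masks (alternative decomposition, same asymptotic cost).

-- ===== PORT A =====
def is_col_win_possible (board_ : List (List String)) : Bool :=
  let n := board_.length
  -- the two nested loops building `columns`; board_[row_][col_] is pyGetD
  -- (always in range under Pre_, where Python does not raise)
  let columns : List (List String) :=
    (PySem.List.pyRange 0 (n : Int)).map (fun col_ =>
      (PySem.List.pyRange 0 (n : Int)).map (fun row_ =>
        PySem.List.pyGetD (PySem.List.pyGetD board_ row_ []) col_ ""))
  if columns.all (fun col_ => col_.contains "X" && col_.contains "O") then false
  else true

-- ===== PORT B =====
def is_col_win_possible_alt (board_ : List (List String)) : Bool :=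
  let n := board_.length
  let st := board_.foldl
    (fun (st : List Bool × List Bool) row =>
      (st.1.zipIdx.map (fun p => decide (PySem.List.pyGetD row (p.2 : Int) "" = "X") || p.1),
       st.2.zipIdx.map (fun p => decide (PySem.List.pyGetD row (p.2 : Int) "" = "O") || p.1)))
    (List.replicate n false, List.replicate n false)
  !(st.1.all (fun h => h) && st.2.all (fun h => h))

-- ===== PRECONDITION & SPEC =====
-- Pre_ excludes exactly the boards on which Python A raises IndexError:
-- those with some row shorter than the number of rows.
def Pre_is_col_win_possible (board_ : List (List String)) : Prop :=
  ∀ row ∈ board_, board_.length ≤ row.length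
instance (board_ : List (List String)) : Decidable (Pre_is_col_win_possible board_) := by
  unfold Pre_is_col_win_possible; infer_instance

def pvWitness_is_col_win_possible : List (List String) := [["X", "O"], ["O", "X"]]

def Spec_is_col_win_possible (board_ : List (List String)) (out : Bool) : Prop := out = is_col_win_possible_alt board_
instance (board_ : List (List String)) (out : Bool) : Decidable (Spec_is_col_win_possible board_ out) := by unfold Spec_is_col_win_possible; infer_instance

-- ===== CLAIM (what is proved, stated in full; the proofs are below) =====
def Claim_equal_is_col_win_possible : Prop := ∀ (board_ : List (List String)), Dom_is_col_win_possible board_ → Pre_is_col_win_possible board_ → Spec_is_col_win_possible board_ (is_col_win_possible board_)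

-- ===== LEMMAS AND PROOFS =====

theorem if_then_false_else_true (c : Bool) : (if c then false else true) = !c := by
  cases c <;> rfl

-- a list is the range-indexed map of its own getD
theorem map_getD_range {α : Type} (l : List α) (d : α) :
    (List.range l.length).map (fun i => l.getD i d) = l := by
  apply List.ext_getElem
  · simp
  · intro i h1 h2
    simp [List.getD_eq_getElem?_getD, List.getElem?_eq_getElem h2]

theorem all_congr_mem {l : List Nat} {p q : Nat → Bool} (h : ∀ x ∈ l, p x = q x) :
    l.all p = l.all q := by
  induction l with
  | nil => rfl
  | cons a t ih =>
    simp only [List.all_cons, h a (by simp), ih (fun x hx => h x (by simp [hx]))]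

theorem all_and_split (l : List Nat) (p q : Nat → Bool) :
    l.all (fun x => p x && q x) = (l.all p && l.all q) := by
  induction l with
  | nil => rfl
  | cons a t ih =>
    cases hp : p a <;> cases hq : q a <;> simp [List.all_cons, hp, hq, ih]

-- B's pair fold splits into two independent folds
theorem foldl_pair_split (board : List (List String)) (hx ho : List Bool) :
    board.foldl
      (fun (st : List Bool × List Bool) row =>
        (st.1.zipIdx.map (fun p => decide (PySem.List.pyGetD row (p.2 : Int) "" = "X") || p.1),
         st.2.zipIdx.map (fun p => decide (PySem.List.pyGetD row (p.2 : Int) "" = "O") || p.1))) (hx, ho)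
    = (board.foldl (fun h row => h.zipIdx.map (fun p => decide (PySem.List.pyGetD row (p.2 : Int) "" = "X") || p.1)) hx,
       board.foldl (fun h row => h.zipIdx.map (fun p => decide (PySem.List.pyGetD row (p.2 : Int) "" = "O") || p.1)) ho) := by
  induction board generalizing hx ho with
  | nil => rfl
  | cons row rest ih =>
    rw [List.foldl_cons]
    exact ih _ _

theorem foldl_mask_length (v : String) (board : List (List String)) (hx : List Bool) :
    (board.foldl (fun h row => h.zipIdx.map (fun p => decide (PySem.List.pyGetD row (p.2 : Int) "" = v) || p.1)) hx).length
      = hx.length := by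
  induction board generalizing hx with
  | nil => rfl
  | cons row rest ih =>
    rw [List.foldl_cons, ih]
    simp

-- one mask fold: entry c accumulates "some row has v in column c"
theorem foldl_mask_getElem? (v : String) (board : List (List String)) (hx : List Bool)
    (hlen : ∀ row ∈ board, hx.length ≤ row.length) (c : Nat) (hc : c < hx.length) :
    (board.foldl (fun h row => h.zipIdx.map (fun p => decide (PySem.List.pyGetD row (p.2 : Int) "" = v) || p.1)) hx)[c]?
      = some (hx.getD c false || board.any (fun row => row.getD c "" = v)) := by
  induction board generalizing hx with
  | nil =>
    simp [List.getD_eq_getElem?_getD, List.getElem?_eq_getElem hc]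
  | cons row rest ih =>
    have hrow : hx.length ≤ row.length := hlen row (by simp)
    have hlen' : (hx.zipIdx.map (fun p => decide (PySem.List.pyGetD row (p.2 : Int) "" = v) || p.1)).length = hx.length := by
      simp
    have hrest : ∀ r ∈ rest, (hx.zipIdx.map (fun p => decide (PySem.List.pyGetD row (p.2 : Int) "" = v) || p.1)).length ≤ r.length := by
      intro r hr; rw [hlen']; exact hlen r (by simp [hr])
    rw [List.foldl_cons, ih _ hrest (hlen' ▸ hc)]
    have hcr : c < row.length := lt_of_lt_of_le hc hrow
    have hz : (hx.zipIdx.map (fun p => decide (PySem.List.pyGetD row (p.2 : Int) "" = v) || p.1)).getD c false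
        = (hx.getD c false || decide (row.getD c "" = v)) := by
      simp [List.getD_eq_getElem?_getD, List.getElem?_map, List.getElem?_zipIdx,
        List.getElem?_eq_getElem hc, List.getElem?_eq_getElem hcr,
        PySem.List.pyGetD_natCast, Bool.or_comm]
    rw [hz]
    simp [List.any_cons, Bool.or_assoc]

theorem mask_all (v : String) (board : List (List String))
    (hpre : ∀ row ∈ board, board.length ≤ row.length) :
    (board.foldl (fun h row => h.zipIdx.map (fun p => decide (PySem.List.pyGetD row (p.2 : Int) "" = v) || p.1))
        (List.replicate board.length false)).all (fun h => h)
    = (List.range board.length).all (fun c => board.any (fun row => row.getD c "" = v)) := by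
  have hlen : ∀ row ∈ board, (List.replicate board.length false).length ≤ row.length := by
    simpa using hpre
  have hstlen : (board.foldl (fun h row => h.zipIdx.map (fun p => decide (PySem.List.pyGetD row (p.2 : Int) "" = v) || p.1))
      (List.replicate board.length false)).length = board.length := by
    simpa using foldl_mask_length v board (List.replicate board.length false)
  conv_lhs => rw [← map_getD_range (board.foldl
      (fun h row => h.zipIdx.map (fun p => decide (PySem.List.pyGetD row (p.2 : Int) "" = v) || p.1))
      (List.replicate board.length false)) false]
  rw [List.all_map, hstlen]
  apply all_congr_mem
  intro c hc
  have hcn : c < board.length := List.mem_range.mp hc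
  have hg := foldl_mask_getElem? v board _ hlen c (by simpa using hcn)
  show (board.foldl (fun h row => h.zipIdx.map (fun p => decide (PySem.List.pyGetD row (p.2 : Int) "" = v) || p.1))
      (List.replicate board.length false)).getD c false = _
  rw [List.getD_eq_getElem?_getD, hg]
  simp

-- A's per-column membership test, re-expressed as an `any` over the rows
theorem colA_eq (board : List (List String)) (c : Nat) (v : String) :
    (((List.range board.length).map (fun r => (board.getD r []).getD c "")).contains v)
    = board.any (fun row => row.getD c "" = v) := by
  have h1 : (List.range board.length).map (fun r => (board.getD r []).getD c "")
      = board.map (fun row => row.getD c "") := by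
    conv_rhs => rw [← map_getD_range board []]
    rw [List.map_map]
    rfl
  rw [h1, Bool.eq_iff_iff, List.contains_iff_mem, List.any_eq_true]
  simp [List.mem_map, eq_comm]

-- A's result, with the range/index plumbing evaluated away
theorem A_char (board : List (List String)) :
    is_col_win_possible board
    = !((List.range board.length).all (fun c =>
        ((List.range board.length).map (fun r => (board.getD r []).getD c "")).contains "X" &&
        ((List.range board.length).map (fun r => (board.getD r []).getD c "")).contains "O")) := by
  unfold is_col_win_possible
  simp only [PySem.List.pyRange_zero_natCast, List.map_map, List.all_map,
    Function.comp_def, PySem.List.pyGetD_natCast, if_then_false_else_true]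

theorem A_eq_B (board : List (List String)) (hpre : Pre_is_col_win_possible board) :
    is_col_win_possible board = is_col_win_possible_alt board := by
  unfold Pre_is_col_win_possible at hpre
  rw [A_char]
  unfold is_col_win_possible_alt
  simp only [foldl_pair_split]
  rw [mask_all "X" board hpre, mask_all "O" board hpre]
  simp only [colA_eq]
  rw [all_and_split (List.range board.length)
    (fun c => board.any (fun row => row.getD c "" = "X"))
    (fun c => board.any (fun row => row.getD c "" = "O"))]

-- ===== VERDICT (by name: the statement is the Claim_ definition above) =====
theorem is_col_win_possible_spec : Claim_equal_is_col_win_possible := by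
  intro board _ hpre
  unfold Spec_is_col_win_possible
  exact A_eq_B board hpre
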